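-- pv_equiv track=rewrite | github.com/pypi-data/pypi-mirror-401 | packages/ace-of-clust/ace_of_clust-0.1.1.tar.gz/ace_of_clust-0.1.1/src/ace_of_clust/analysis.py | _find_directed_path
-- ===== SOURCE A (Python) =====
-- from typing import Dict, List, Mapping, Sequence, Tuple, Union, Optional, Any, Iterable, Callable
--
-- def _find_directed_path(
--     graph: Mapping[str, Sequence[str]],
--     src: str,
--     dst: str,
-- ) -> List[str] | None:
--     """
--     BFS to find a path from src to dst in a directed graph (edges in graph[src]).
--     Returns a list [src, ..., dst], or None if no path.
--     """
--     from collections import deque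
--
--     q = deque([src])
--     parent = {src: None}
--
--     while q:
--         u = q.popleft()
--         if u == dst:
--             break
--         for v in graph.get(u, []):
--             if v not in parent:
--                 parent[v] = u
--                 q.append(v)
--
--     if dst not in parent:
--         return None
--
--     # reconstruct path
--     path: List[str] = []
--     v = dst
--     while v is not None:
--         path.append(v)
--         v = parent[v]
--     path.reverse()
--     return path
-- ===== SOURCE B (Python) =====
-- from collections import deque
--
-- def _find_directed_path(graph, src, dst):
--     """BFS storing whole paths in the queue: no parent map, no reconstruction pass."""
--     q = deque([[src]])
--     visited = {src}
--     while q: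
--         path = q.popleft()
--         u = path[-1]
--         if u == dst:
--             return path
--         for v in graph.get(u, []):
--             if v not in visited:
--                 visited.add(v)
--                 q.append(path + [v])
--     return None
-- ===== Notes on version B (the rewrite author's own statement) =====
-- stated objective: simpler
-- what changed: Replaces A's parent-pointer dict plus separate backward path-reconstruction loop with a BFS whose queue carries whole paths and a visited set, returning the popped path directly.
import Mathlib
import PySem

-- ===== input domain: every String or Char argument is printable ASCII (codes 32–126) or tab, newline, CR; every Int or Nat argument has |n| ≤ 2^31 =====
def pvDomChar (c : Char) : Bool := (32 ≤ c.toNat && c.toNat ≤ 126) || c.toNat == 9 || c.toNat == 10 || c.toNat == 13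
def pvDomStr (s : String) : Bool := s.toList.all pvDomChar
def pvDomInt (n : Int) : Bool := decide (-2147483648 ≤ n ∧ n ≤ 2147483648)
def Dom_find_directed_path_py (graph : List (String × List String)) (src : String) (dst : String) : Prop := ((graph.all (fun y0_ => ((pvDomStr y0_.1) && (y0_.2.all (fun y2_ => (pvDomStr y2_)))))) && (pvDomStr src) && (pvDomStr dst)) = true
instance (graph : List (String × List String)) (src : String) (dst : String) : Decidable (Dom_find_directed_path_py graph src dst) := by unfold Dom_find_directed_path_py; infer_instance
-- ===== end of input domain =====

-- B replaces A's parent-pointer map and reverse path reconstruction by a BFS queue that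
-- carries whole paths (objective: simpler — no second reconstruction loop). Same return value everywhere.

-- graph.get(u, []): association-list lookup, first match (the Mapping has unique keys)
def pvAdj (graph : List (String × List String)) (u : String) : List String :=
  match graph.find? (fun p => p.1 == u) with
  | some p => p.2
  | none => []

-- ===== PORT A =====
-- the BFS while-loop: state = (queue, parent dict); fuel only makes the recursion structural
-- (pvFuelA is provably never exhausted: each iteration pops one element and every enqueue
-- marks a previously-unseen adjacency target)
def pvLoopA (graph : List (String × List String)) (dst : String) :
    Nat → List String → PySem.Dict String (Option String) → PySem.Dict String (Option String)
  | 0, _, p => p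
  | _ + 1, [], p => p
  | f + 1, u :: q, p =>
    if u == dst then p
    else
      let st := (pvAdj graph u).foldl
        (fun (s : List String × PySem.Dict String (Option String)) v =>
          if s.2.contains v then s else (s.1 ++ [v], s.2.insert v (some u)))
        (q, p)
      pvLoopA graph dst f st.1 st.2

-- path reconstruction: while v is not None: path.append(v); v = parent[v]
-- (a missing key would be a KeyError in Python; unreachable for the dict the loop builds,
-- the `| _ =>` arm below is never taken — fuel p.size+1 covers the chain, whose keys are distinct)
def pvReconA (p : PySem.Dict String (Option String)) : Nat → String → List String → List String
  | 0, _, path => path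
  | f + 1, v, path =>
    match p.get? v with
    | some (some u) => pvReconA p f u (path ++ [v])
    | _ => path ++ [v]

def pvFuelA (graph : List (String × List String)) : Nat := (graph.flatMap (·.2)).length + 1

def find_directed_path_py (graph : List (String × List String)) (src : String) (dst : String) : Option (List String) :=
  let p := pvLoopA graph dst (pvFuelA graph) [src] ((PySem.Dict.empty).insert src none)
  if p.contains dst then some ((pvReconA p (p.size + 1) dst []).reverse)
  else none

-- ===== PORT B =====
-- BFS with a queue of whole paths and a visited set; popping a path ending at dst returns it
def pvLoopB (graph : List (String × List String)) (dst : String) :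
    Nat → List (List String) → PySem.Set String → Option (List String)
  | 0, _, _ => none
  | _ + 1, [], _ => none
  | f + 1, path :: q, V =>
    match PySem.List.pyGet? path (-1) with
    | none => none   -- unreachable: every queued path is nonempty
    | some u =>
      if u == dst then some path
      else
        let st := (pvAdj graph u).foldl
          (fun (s : List (List String) × PySem.Set String) v =>
            if PySem.Set.contains s.2 v then s
            else (s.1 ++ [path ++ [v]], PySem.Set.add s.2 v))
          (q, V)
        pvLoopB graph dst f st.1 st.2

def find_directed_path_py_alt (graph : List (String × List String)) (src : String) (dst : String) : Option (List String) :=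
  pvLoopB graph dst (pvFuelA graph) [[src]] (PySem.Set.ofList [src])

-- ===== PRECONDITION & SPEC =====
def Spec_find_directed_path_py (graph : List (String × List String)) (src : String) (dst : String) (out : Option (List String)) : Prop := out = find_directed_path_py_alt graph src dst
instance (graph : List (String × List String)) (src : String) (dst : String) (out : Option (List String)) : Decidable (Spec_find_directed_path_py graph src dst out) := by unfold Spec_find_directed_path_py; infer_instance

-- ===== CLAIM (what is proved, stated in full; the proofs are below) =====
def Claim_equal_find_directed_path_py : Prop := ∀ (graph : List (String × List String)) (src : String) (dst : String), Dom_find_directed_path_py graph src dst → Spec_find_directed_path_py graph src dst (find_directed_path_py graph src dst)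

-- ===== LEMMAS AND PROOFS =====

-- `l` is a parent chain of `p` ending at `v`: head maps to none, each later node to its predecessor
inductive pvChainTo (p : PySem.Dict String (Option String)) : List String → String → Prop
  | base (v : String) : p.get? v = some none → pvChainTo p [v] v
  | step (l : List String) (u v : String) :
      pvChainTo p l u → p.get? v = some (some u) → pvChainTo p (l ++ [v]) v

theorem pvChainTo_getLast? {p : PySem.Dict String (Option String)} {l : List String} {v : String}
    (h : pvChainTo p l v) : l.getLast? = some v := by
  cases h with
  | base v hv => rfl
  | step l u v hl hv => simp

theorem pvChainTo_isSome {p : PySem.Dict String (Option String)} {l : List String} {v : String}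
    (h : pvChainTo p l v) : (p.get? v).isSome := by
  cases h with
  | base v hv => simp [hv]
  | step l u v hl hv => simp [hv]

theorem pvChainTo_mem_isSome {p : PySem.Dict String (Option String)} {l : List String} {v : String}
    (h : pvChainTo p l v) : ∀ x ∈ l, (p.get? x).isSome := by
  induction h with
  | base v hv => intro x hx; simp at hx; subst hx; simp [hv]
  | step l u v hl hv ih =>
    intro x hx
    rcases List.mem_append.1 hx with hx | hx
    · exact ih x hx
    · simp at hx; subst hx; simp [hv]

-- chains survive insertion of a fresh key
theorem pvChainTo_insert {p : PySem.Dict String (Option String)} {l : List String} {v : String}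
    (h : pvChainTo p l v) {k : String} (hk : p.contains k = false) (w : Option String) :
    pvChainTo (p.insert k w) l v := by
  induction h with
  | base v hv =>
    refine pvChainTo.base v ?_
    rw [PySem.Dict.get?_insert_of_ne]
    · exact hv
    · intro he; subst he
      rw [PySem.Dict.contains_eq_isSome_get?, hv] at hk; simp at hk
  | step l u v hl hv ih =>
    refine pvChainTo.step l u v ih ?_
    rw [PySem.Dict.get?_insert_of_ne]
    · exact hv
    · intro he; subst he
      rw [PySem.Dict.contains_eq_isSome_get?, hv] at hk; simp at hk

-- the reconstruction loop follows a chain exactly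
theorem pvReconA_chain {p : PySem.Dict String (Option String)} {l : List String} {v : String}
    (h : pvChainTo p l v) : ∀ (fuel : Nat) (acc : List String), l.length ≤ fuel →
    pvReconA p fuel v acc = acc ++ l.reverse := by
  induction h with
  | base v hv =>
    intro fuel acc hf
    cases fuel with
    | zero => simp at hf
    | succ f => simp [pvReconA, hv]
  | step l u v hl hv ih =>
    intro fuel acc hf
    cases fuel with
    | zero => simp at hf
    | succ f =>
      have hlen : l.length ≤ f := by simp at hf; omega
      simp only [pvReconA, hv]
      rw [ih f (acc ++ [v]) hlen]
      simp

theorem pvReconA_chain_top {p : PySem.Dict String (Option String)} {l : List String} {v : String}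
    (h : pvChainTo p l v) (hnd : l.Nodup) :
    pvReconA p (p.size + 1) v [] = l.reverse := by
  have hsub : l ⊆ p.keys := by
    intro x hx
    have := pvChainTo_mem_isSome h x hx
    rw [← PySem.Dict.contains_eq_isSome_get?, PySem.Dict.contains_iff_mem_keys] at this
    exact this
  have hle : l.length ≤ p.keys.length :=
    (List.subperm_of_subset hnd hsub).length_le
  have : l.length ≤ p.size + 1 := by
    have : p.keys.length = p.size := by simp [PySem.Dict.keys, PySem.Dict.size]
    omega
  simpa using pvReconA_chain h (p.size + 1) [] this

-- the "unseen adjacency targets" part of the termination measure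
def pvFresh (graph : List (String × List String)) (p : PySem.Dict String (Option String)) : Nat :=
  ((PySem.Set.ofList (graph.flatMap (·.2))).filter (fun v => !(p.contains v))).length

theorem pvForall₂_append {α β : Type} {R : α → β → Prop} {l₁ u₁ : List α} {l₂ u₂ : List β}
    (h₁ : List.Forall₂ R l₁ l₂) (h₂ : List.Forall₂ R u₁ u₂) :
    List.Forall₂ R (l₁ ++ u₁) (l₂ ++ u₂) := by
  induction h₁ with
  | nil => simpa
  | cons h _ ih => exact List.Forall₂.cons h ih

-- the main invariant relating an A-state to a B-state
def pvInv (dst : String) (p : PySem.Dict String (Option String)) (q : List String)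
    (qb : List (List String)) (V : PySem.Set String) : Prop :=
  (∀ x, PySem.Set.contains V x = p.contains x) ∧
  List.Forall₂ (fun u pa => pvChainTo p pa u ∧ pa.Nodup) q qb ∧
  (p.contains dst = true → dst ∈ q) ∧
  p.keys.Nodup

theorem pvAdj_subset {graph : List (String × List String)} {u : String} :
    ∀ v ∈ pvAdj graph u, v ∈ graph.flatMap (·.2) := by
  intro v hv
  unfold pvAdj at hv
  cases hfind : graph.find? (fun p => p.1 == u) with
  | none => rw [hfind] at hv; simp at hv
  | some pr =>
    rw [hfind] at hv
    exact List.mem_flatMap.2 ⟨pr, List.mem_of_find?_eq_some hfind, hv⟩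

-- inserting a fresh key: the filter keeping unseen elements loses exactly that element
theorem pvFilter_insert (p : PySem.Dict String (Option String)) (w : Option String) (v : String)
    (hfresh : p.contains v = false) :
    ∀ (s : List String), s.Nodup → v ∈ s →
    (s.filter (fun x => !(p.insert v w).contains x)).length + 1
      = (s.filter (fun x => !p.contains x)).length := by
  intro s
  induction s with
  | nil => intro _ h; simp at h
  | cons a s ih =>
    intro hnd hmem
    have hnd' : s.Nodup := (List.nodup_cons.1 hnd).2
    by_cases hva : v = a
    · subst hva
      have hnot : v ∉ s := (List.nodup_cons.1 hnd).1
      have hsame : s.filter (fun x => !(p.insert v w).contains x) = s.filter (fun x => !p.contains x) := by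
        apply List.filter_congr
        intro x hx
        have hxv : (x == v) = false := by
          simp only [beq_eq_false_iff_ne]; exact fun he => hnot (he ▸ hx)
        rw [PySem.Dict.contains_insert, hxv]
        simp
      simp [hfresh, PySem.Dict.contains_insert_self, hsame]
    · have hmem' : v ∈ s := by
        rcases List.mem_cons.1 hmem with h | h
        · exact absurd h hva
        · exact h
      have hsame : (p.insert v w).contains a = p.contains a := by
        rw [PySem.Dict.contains_insert]
        have : (a == v) = false := by simp only [beq_eq_false_iff_ne]; exact fun h => hva h.symm
        rw [this]; simp
      have ih' := ih hnd' hmem'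
      simp only [List.filter_cons, hsame]
      cases hca : p.contains a <;> simp <;> omega

theorem pvFresh_insert {graph : List (String × List String)}
    {p : PySem.Dict String (Option String)} {v : String}
    (hv : v ∈ graph.flatMap (·.2)) (hfresh : p.contains v = false) (w : Option String) :
    pvFresh graph (p.insert v w) + 1 = pvFresh graph p := by
  unfold pvFresh
  exact pvFilter_insert p w v hfresh _ (PySem.Set.nodup_ofList _)
    ((PySem.Set.mem_ofList _ _).2 hv)

-- ===== the inner for-loop: the two folds stay related =====
theorem pvFold_rel (graph : List (String × List String)) (dst u : String) (pa : List String) :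
    ∀ (adj : List String), (∀ v ∈ adj, v ∈ graph.flatMap (·.2)) →
    ∀ (q₁ : List String) (p₁ : PySem.Dict String (Option String))
      (q₂ : List (List String)) (V₂ : PySem.Set String),
    pvInv dst p₁ q₁ q₂ V₂ →
    pvChainTo p₁ pa u → pa.Nodup →
    let stA := adj.foldl
        (fun (s : List String × PySem.Dict String (Option String)) v =>
          if s.2.contains v then s else (s.1 ++ [v], s.2.insert v (some u))) (q₁, p₁)
    let stB := adj.foldl
        (fun (s : List (List String) × PySem.Set String) v =>
          if PySem.Set.contains s.2 v then s
          else (s.1 ++ [pa ++ [v]], PySem.Set.add s.2 v)) (q₂, V₂)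
    pvInv dst stA.2 stA.1 stB.1 stB.2 ∧
      stA.1.length + pvFresh graph stA.2 ≤ q₁.length + pvFresh graph p₁ := by
  intro adj
  induction adj with
  | nil =>
    intro _ q₁ p₁ q₂ V₂ hinv hch hnd
    exact ⟨hinv, le_refl _⟩
  | cons v adj ih =>
    intro hsub q₁ p₁ q₂ V₂ hinv hch hnd
    obtain ⟨hV, hF, hdst, hkeys⟩ := hinv
    simp only [List.foldl_cons]
    by_cases hcv : p₁.contains v = true
    · -- already seen: both folds skip
      rw [if_pos hcv, if_pos (by rw [hV]; exact hcv)]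
      exact ih (fun x hx => hsub x (List.mem_cons_of_mem _ hx)) q₁ p₁ q₂ V₂ ⟨hV, hF, hdst, hkeys⟩ hch hnd
    · -- fresh: both folds extend
      have hcv' : p₁.contains v = false := by simpa using hcv
      rw [if_neg (by simp [hcv']), if_neg (by rw [hV, hcv']; simp)]
      have hvnotpa : v ∉ pa := by
        intro hmem
        have := pvChainTo_mem_isSome hch v hmem
        rw [← PySem.Dict.contains_eq_isSome_get?, hcv'] at this; simp at this
      have hch' : pvChainTo (p₁.insert v (some u)) (pa ++ [v]) v :=
        pvChainTo.step pa u v (pvChainTo_insert hch hcv' (some u)) (PySem.Dict.get?_insert_self p₁ v (some u))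
      have hinv' : pvInv dst (p₁.insert v (some u)) (q₁ ++ [v]) (q₂ ++ [pa ++ [v]]) (PySem.Set.add V₂ v) := by
        refine ⟨?_, ?_, ?_, ?_⟩
        · intro x
          have hxm : x ∈ V₂ ↔ p₁.contains x = true := by rw [← PySem.Set.contains_iff, hV x]
          rw [Bool.eq_iff_iff]
          simp only [PySem.Set.contains_iff, PySem.Set.mem_add, PySem.Dict.contains_insert,
            Bool.or_eq_true, beq_iff_eq, hxm]
          tauto
        · refine pvForall₂_append (hF.imp ?_) ?_
          · rintro a b ⟨hcb, hnb⟩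
            exact ⟨pvChainTo_insert hcb hcv' (some u), hnb⟩
          · refine List.Forall₂.cons ⟨hch', ?_⟩ List.Forall₂.nil
            exact List.Nodup.append hnd (List.nodup_singleton v) (by simpa using hvnotpa)
        · intro hc
          rw [PySem.Dict.contains_insert] at hc
          rcases Bool.or_eq_true_iff.1 hc with hc | hc
          · have : dst = v := by exact_mod_cast eq_of_beq hc
            simp [this]
          · exact List.mem_append_left _ (hdst hc)
        · exact PySem.Dict.nodup_keys_insert p₁ v (some u) hkeys
      have hmeas := pvFresh_insert (hsub v (List.mem_cons_self)) hcv' (some u)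
      have := ih (fun x hx => hsub x (List.mem_cons_of_mem _ hx)) (q₁ ++ [v]) (p₁.insert v (some u))
        (q₂ ++ [pa ++ [v]]) (PySem.Set.add V₂ v) hinv'
        (pvChainTo_insert hch hcv' (some u)) hnd
      refine ⟨this.1, le_trans this.2 ?_⟩
      simp only [List.length_append, List.length_singleton]
      omega

-- ===== the outer while-loop =====
theorem pvLoop_rel (graph : List (String × List String)) (dst : String) :
    ∀ (fuel : Nat) (q : List String) (p : PySem.Dict String (Option String))
      (qb : List (List String)) (V : PySem.Set String),
    pvInv dst p q qb V →
    q.length + pvFresh graph p ≤ fuel →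
    (let pf := pvLoopA graph dst fuel q p
     if pf.contains dst then some ((pvReconA pf (pf.size + 1) dst []).reverse) else none)
      = pvLoopB graph dst fuel qb V := by
  intro fuel
  induction fuel with
  | zero =>
    intro q p qb V hinv hle
    have hq : q = [] := by
      cases q with
      | nil => rfl
      | cons a l => simp at hle
    subst hq
    obtain ⟨hV, hF, hdst, hkeys⟩ := hinv
    have hqb : qb = [] := by cases hF; rfl
    subst hqb
    have hc : p.contains dst = false := by
      cases hcd : p.contains dst with
      | false => rfl
      | true => exact absurd (hdst hcd) (by simp)
    simp [pvLoopA, pvLoopB, hc]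
  | succ f ih =>
    intro q p qb V hinv hle
    obtain ⟨hV, hF, hdst, hkeys⟩ := hinv
    cases q with
    | nil =>
      have hqb : qb = [] := by cases hF; rfl
      subst hqb
      have hc : p.contains dst = false := by
        cases hcd : p.contains dst with
        | false => rfl
        | true => exact absurd (hdst hcd) (by simp)
      simp [pvLoopA, pvLoopB, hc]
    | cons u q' =>
      cases hF with
      | cons hpa hF' =>
        rename_i pa qb'
        obtain ⟨hch, hnd⟩ := hpa
        have hlast : PySem.List.pyGet? pa (-1) = some u := by
          rw [PySem.List.pyGet?_neg_one, pvChainTo_getLast? hch]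
        by_cases hud : u = dst
        · subst hud
          have hcd : p.contains u = true := by
            rw [PySem.Dict.contains_eq_isSome_get?]
            simpa using pvChainTo_isSome hch
          simp only [pvLoopA, pvLoopB, hlast, beq_self_eq_true, if_pos]
          rw [if_pos hcd, pvReconA_chain_top hch hnd]
          simp
        · have hbe : (u == dst) = false := by simpa using hud
          simp only [pvLoopA, pvLoopB, hlast, hbe, if_false, Bool.false_eq_true]
          have hinv' : pvInv dst p q' qb' V := by
            refine ⟨hV, hF', ?_, hkeys⟩
            intro hc
            rcases List.mem_cons.1 (hdst hc) with h | h
            · exact absurd h.symm hud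
            · exact h
          have hfold := pvFold_rel graph dst u pa (pvAdj graph u) pvAdj_subset q' p qb' V hinv' hch hnd
          refine ih _ _ _ _ hfold.1 ?_
          have := hfold.2
          simp only [List.length_cons] at hle
          omega

-- initial state satisfies the invariant
theorem pvInit_inv (src dst : String) :
    pvInv dst ((PySem.Dict.empty).insert src none) [src] [[src]] (PySem.Set.ofList [src]) := by
  refine ⟨?_, ?_, ?_, ?_⟩
  · intro x
    rw [PySem.Dict.contains_insert, PySem.Dict.contains_empty, Bool.or_false]
    simp only [PySem.Set.contains]
    by_cases h : x = src <;> simp [h]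
  · refine List.Forall₂.cons ⟨?_, List.nodup_singleton src⟩ List.Forall₂.nil
    exact pvChainTo.base src (PySem.Dict.get?_insert_self _ src none)
  · intro hc
    rw [PySem.Dict.contains_insert] at hc
    rcases Bool.or_eq_true_iff.1 hc with hc | hc
    · have : dst = src := by exact_mod_cast eq_of_beq hc
      simp [this]
    · rw [PySem.Dict.contains_empty] at hc; exact absurd hc (by simp)
  · exact PySem.Dict.nodup_keys_insert _ src none (PySem.Dict.nodup_keys_empty)

-- set(xs) is no longer than xs (for the initial fuel bound)
theorem pvSet_foldl_add_length (xs : List String) :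
    ∀ s : PySem.Set String, (xs.foldl PySem.Set.add s).length ≤ s.length + xs.length := by
  induction xs with
  | nil => intro s; simp
  | cons a xs ih =>
    intro s
    simp only [List.foldl_cons]
    refine le_trans (ih (PySem.Set.add s a)) ?_
    have h : (PySem.Set.add s a).length ≤ s.length + 1 := by
      unfold PySem.Set.add
      split
      · omega
      · simp
    simp only [List.length_cons]
    omega

theorem pvFresh_init (graph : List (String × List String)) (p : PySem.Dict String (Option String)) :
    1 + pvFresh graph p ≤ pvFuelA graph := by
  unfold pvFresh pvFuelA
  have h1 : ((PySem.Set.ofList (graph.flatMap (·.2))).filter (fun v => !(p.contains v))).length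
      ≤ (PySem.Set.ofList (graph.flatMap (·.2))).length := List.length_filter_le _ _
  have h2 : (PySem.Set.ofList (graph.flatMap (·.2))).length ≤ (graph.flatMap (·.2)).length := by
    rw [PySem.Set.ofList_eq_foldl]
    simpa using pvSet_foldl_add_length (graph.flatMap (·.2)) []
  omega

-- ===== VERDICT (by name: the statement is the Claim_ definition above) =====
theorem find_directed_path_py_spec : Claim_equal_find_directed_path_py := by
  intro graph src dst _
  show find_directed_path_py graph src dst = find_directed_path_py_alt graph src dst
  unfold find_directed_path_py find_directed_path_py_alt
  exact pvLoop_rel graph dst (pvFuelA graph) [src] _ [[src]] (PySem.Set.ofList [src])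
    (pvInit_inv src dst) (by simpa using pvFresh_init graph _)
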